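-- pv_equiv track=rewrite | github.com/gddickinson/poetry_system | analyzer_old.py | _find_assonance
-- ===== SOURCE A (Python) =====
-- from collections import defaultdict
--
-- def _find_assonance(poem):
--     """Find instances of assonance (repeated vowel sounds)"""
--     vowels = 'aeiou'
--     words = poem.lower().split()
--     assonance_patterns = defaultdict(list)
--
--     for word in words:
--         vowel_pattern = ''.join(char for char in word if char in vowels)
--         if len(vowel_pattern) >= 2:
--             assonance_patterns[vowel_pattern].append(word)
--
--     return {k: v for k, v in assonance_patterns.items() if len(v) >= 2}
-- ===== SOURCE B (Python) =====
-- def _find_assonance(poem):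
--     """Find instances of assonance (repeated vowel sounds)"""
--     vowels = 'aeiou'
--     pairs = [(''.join(c for c in w if c in vowels), w) for w in poem.lower().split()]
--     qual = [(p, w) for p, w in pairs if len(p) >= 2]
--     keys = list(dict.fromkeys(p for p, _ in qual))
--     result = {}
--     for k in keys:
--         group = [w for p, w in qual if p == k]
--         if len(group) >= 2:
--             result[k] = group
--     return result
-- ===== Notes on version B (the rewrite author's own statement) =====
-- stated objective: idiomatic
-- what changed: Replaces the defaultdict bucketing loop with a declarative pipeline: build (pattern, word) pairs, filter to patterns of length >= 2, dedup the patterns to get first-occurrence key order, then collect each key's group by a per-key scan and keep groups of >= 2 words.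
import Mathlib
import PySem

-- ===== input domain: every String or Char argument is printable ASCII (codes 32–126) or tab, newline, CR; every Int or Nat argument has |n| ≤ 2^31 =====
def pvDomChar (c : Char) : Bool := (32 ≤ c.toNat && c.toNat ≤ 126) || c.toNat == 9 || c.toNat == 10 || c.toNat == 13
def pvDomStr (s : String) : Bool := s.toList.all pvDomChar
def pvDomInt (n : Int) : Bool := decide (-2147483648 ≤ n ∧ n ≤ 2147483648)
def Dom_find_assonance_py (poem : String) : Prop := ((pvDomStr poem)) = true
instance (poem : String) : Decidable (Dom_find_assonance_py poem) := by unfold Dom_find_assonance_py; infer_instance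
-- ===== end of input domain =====

-- B replaces A's defaultdict bucketing with a dedup-keys + per-key-collection pipeline (idiomatic, not faster).

-- shared helper: ''.join(char for char in word if char in 'aeiou') (identical expression in both sources)
def vowelPattern (w : String) : String :=
  String.mk (w.toList.filter (fun c => ['a','e','i','o','u'].contains c))

-- ===== PORT A =====
def find_assonance_py (poem : String) : List (String × List String) :=
  let words := PySem.Str.split₀ (PySem.Str.lower poem)
  let d := words.foldl (fun d w =>
      let vp := vowelPattern w
      if 2 ≤ PySem.Str.len vp then d.modify vp [] (fun v => v ++ [w]) else d)
    PySem.Dict.empty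
  -- {k: v for k, v in d.items() if len(v) >= 2}: keys of d are unique, so this is a filter of items
  (PySem.Dict.items d).filter (fun kv => 2 ≤ (kv.2.length : Int))

-- ===== PORT B =====
def find_assonance_py_alt (poem : String) : List (String × List String) :=
  let pairs := (PySem.Str.split₀ (PySem.Str.lower poem)).map (fun w => (vowelPattern w, w))
  let qual := pairs.filter (fun p => 2 ≤ PySem.Str.len p.1)
  let keys := PySem.List.dedup (qual.map (fun p => p.1))
  -- result[k] = group over the distinct fresh keys k: each dict insert appends — exact
  keys.foldl (fun res k =>
      let group := (qual.filter (fun p => p.1 == k)).map (fun p => p.2)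
      if 2 ≤ (group.length : Int) then res ++ [(k, group)] else res) []

-- ===== PRECONDITION & SPEC =====
def Spec_find_assonance_py (poem : String) (out : List (String × List String)) : Prop := out = find_assonance_py_alt poem
instance (poem : String) (out : List (String × List String)) : Decidable (Spec_find_assonance_py poem out) := by unfold Spec_find_assonance_py; infer_instance

-- ===== CLAIM (what is proved, stated in full; the proofs are below) =====
def Claim_equal_find_assonance_py : Prop := ∀ (poem : String), Dom_find_assonance_py poem → Spec_find_assonance_py poem (find_assonance_py poem)

-- ===== LEMMAS AND PROOFS =====

-- A's filtering loop equals a modify-fold over the filtered (pattern, word) pairs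
theorem foldA_eq (ws : List String) (d : PySem.Dict String (List String)) :
    ws.foldl (fun d w =>
        let vp := vowelPattern w
        if 2 ≤ PySem.Str.len vp then d.modify vp [] (fun v => v ++ [w]) else d) d
    = ((ws.map (fun w => (vowelPattern w, w))).filter (fun p => 2 ≤ PySem.Str.len p.1)).foldl
        (fun d p => d.modify p.1 [] (fun v => v ++ [p.2])) d := by
  induction ws generalizing d with
  | nil => rfl
  | cons w ws ih =>
    simp only [List.foldl_cons, List.map_cons, List.filter_cons, decide_eq_true_eq]
    split_ifs with h
    · rw [List.foldl_cons, ih]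
    · exact ih d

-- a conditional-append fold is a filter-then-map
theorem foldB_eq {α β : Type} (l : List α) (f : α → β) (P : α → Prop) [DecidablePred P]
    (acc : List β) :
    l.foldl (fun res k => if P k then res ++ [f k] else res) acc
    = acc ++ (l.filter (fun k => decide (P k))).map f := by
  induction l generalizing acc with
  | nil => simp
  | cons k l ih =>
    simp only [List.foldl_cons, List.filter_cons]
    by_cases h : P k <;> simp [h, ih]

theorem map_filter_congr {α β : Type} (keys : List α) (f : α → β) (C : β → Bool)
    (C' : α → Bool) (h : ∀ k, C (f k) = C' k) :
    (keys.map f).filter C = (keys.filter C').map f := by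
  induction keys with
  | nil => rfl
  | cons k keys ih =>
    simp only [List.map_cons, List.filter_cons, h]
    by_cases hc : C' k = true <;> simp [hc, ih]

set_option maxHeartbeats 1000000 in
theorem find_assonance_py_eq_alt (poem : String) :
    find_assonance_py poem = find_assonance_py_alt poem := by
  unfold find_assonance_py find_assonance_py_alt
  simp only [foldA_eq]
  obtain ⟨qual, hqual⟩ : ∃ q, ((PySem.Str.split₀ (PySem.Str.lower poem)).map
      (fun w => (vowelPattern w, w))).filter (fun p => 2 ≤ PySem.Str.len p.1) = q := ⟨_, rfl⟩
  rw [hqual]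
  obtain ⟨D, hD⟩ : ∃ d, qual.foldl (fun d p => d.modify p.1 [] (fun v => v ++ [p.2]))
      PySem.Dict.empty = d := ⟨_, rfl⟩
  rw [hD]
  have hkeys : D.keys = PySem.Set.ofList (qual.map (fun p => p.1)) := by
    rw [← hD, PySem.Dict.keys_foldl_modify_key qual (fun p => p.1) [] (fun _ p v => v ++ [p.2])]
    simp [PySem.Set.update_nil_left]
  have hnd : D.keys.Nodup := by
    rw [← hD]
    exact PySem.Dict.nodup_keys_foldl_modify_key qual (fun p => p.1) [] _ _ (by simp)
  have hgetD : (fun k => (k, D.getD k []))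
      = fun k => (k, (qual.filter (fun p => p.1 == k)).map (fun p => p.2)) := by
    funext k
    rw [← hD, PySem.Dict.getD_foldl_modify_append]
    simp
  have hB := foldB_eq (PySem.Set.ofList (qual.map (fun p => p.1)))
      (fun k => (k, (qual.filter (fun p => p.1 == k)).map (fun p => p.2)))
      (fun k => 2 ≤ (((qual.filter (fun p => p.1 == k)).map (fun p => p.2)).length : Int))
      ([] : List (String × List String))
  rw [PySem.List.dedup_eq_ofList, hB, PySem.Dict.items_eq_map_keys D hnd [], hkeys, hgetD,
    List.nil_append]
  exact map_filter_congr _ _ _ _ (fun k => rfl)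

-- ===== VERDICT (by name: the statement is the Claim_ definition above) =====
theorem find_assonance_py_spec : Claim_equal_find_assonance_py := by
  intro poem _
  unfold Spec_find_assonance_py
  exact find_assonance_py_eq_alt poem
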